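-- pv_equiv track=rewrite | github.com/davidbrochart/anycorn | src/anycorn/utils.py | _subject_to_rfc4514
-- ===== SOURCE A (Python) =====
-- from collections.abc import Awaitable, Iterable
--
-- RFC4514_ATTRIBUTE_NAMES = {
--     "commonName": "CN",
--     "countryName": "C",
--     "localityName": "L",
--     "stateOrProvinceName": "ST",
--     "organizationName": "O",
--     "organizationalUnitName": "OU",
--     "emailAddress": "emailAddress",
--     "serialNumber": "serialNumber",
--     "streetAddress": "street",
--     "postalCode": "postalCode",
--     "domainComponent": "DC",
-- }
--
-- def _escape_rfc4514_value(value: str) -> str: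
--     escaped = []
--     for index, char in enumerate(value):
--         if (
--             char in {",", "+", '"', "\\", "<", ">", ";"}
--             or (index == 0 and char in {"#", " "})
--             or (index == len(value) - 1 and char == " ")
--         ):
--             escaped.append("\\" + char)
--         else:
--             escaped.append(char)
--     return "".join(escaped)
--
-- def _subject_to_rfc4514(subject: Iterable[Iterable[tuple[str, str]]]) -> str | None:
--     rdns: list[str] = []
--     try:
--         for rdn in reversed(tuple(subject)):
--             attrs = []
--             for key, value in rdn:
--                 name = RFC4514_ATTRIBUTE_NAMES.get(key, key)
--                 attrs.append(f"{name}={_escape_rfc4514_value(str(value))}")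
--             rdns.append("+".join(attrs))
--     except Exception:
--         return None
--     return ",".join(rdns) if rdns else None
-- ===== SOURCE B (Python) =====
-- RFC4514_ATTRIBUTE_NAMES = {
--     "commonName": "CN",
--     "countryName": "C",
--     "localityName": "L",
--     "stateOrProvinceName": "ST",
--     "organizationName": "O",
--     "organizationalUnitName": "OU",
--     "emailAddress": "emailAddress",
--     "serialNumber": "serialNumber",
--     "streetAddress": "street",
--     "postalCode": "postalCode",
--     "domainComponent": "DC",
-- }
--
--
-- def _escape_rfc4514_value(value: str) -> str:
--     # Staged whole-string passes: escape backslashes first, then each other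
--     # always-special character with one str.replace pass, then patch the two
--     # position-dependent cases (trailing space, leading '#'/space).
--     out = value.replace("\\", "\\\\")
--     for ch in ',+"<>;':
--         out = out.replace(ch, "\\" + ch)
--     if value.endswith(" ") and len(value) > 1:
--         out = out[:-1] + "\\ "
--     if value[:1] in ("#", " "):
--         out = "\\" + out
--     return out
--
--
-- def _subject_to_rfc4514(subject):
--     # Recursive descent over the RDN list: the head RDN is appended AFTER the
--     # formatted tail, so the RFC4514 reversal emerges from the recursion shape
--     # instead of an explicit reversed() loop.
--     def fmt(rdns):
--         if not rdns:
--             return None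
--         head, tail = rdns[0], rdns[1:]
--         attrs = "+".join(
--             f"{RFC4514_ATTRIBUTE_NAMES.get(key, key)}={_escape_rfc4514_value(str(value))}"
--             for key, value in head
--         )
--         rest = fmt(tail)
--         return attrs if rest is None else rest + "," + attrs
--
--     try:
--         return fmt(list(subject))
--     except Exception:
--         return None
-- ===== Notes on version B (the rewrite author's own statement) =====
-- stated objective: alternative
-- what changed: The escape helper is rebuilt as seven whole-string str.replace passes (backslash first, then each always-special char) followed by two boundary patches, replacing A's single enumerate loop with per-index classification; the outer function is a recursive descent over the RDN list that appends the head after the formatted tail, so the RFC4514 reversal emerges from the recursion shape instead of A's reversed()-loop accumulator.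
import Mathlib
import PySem

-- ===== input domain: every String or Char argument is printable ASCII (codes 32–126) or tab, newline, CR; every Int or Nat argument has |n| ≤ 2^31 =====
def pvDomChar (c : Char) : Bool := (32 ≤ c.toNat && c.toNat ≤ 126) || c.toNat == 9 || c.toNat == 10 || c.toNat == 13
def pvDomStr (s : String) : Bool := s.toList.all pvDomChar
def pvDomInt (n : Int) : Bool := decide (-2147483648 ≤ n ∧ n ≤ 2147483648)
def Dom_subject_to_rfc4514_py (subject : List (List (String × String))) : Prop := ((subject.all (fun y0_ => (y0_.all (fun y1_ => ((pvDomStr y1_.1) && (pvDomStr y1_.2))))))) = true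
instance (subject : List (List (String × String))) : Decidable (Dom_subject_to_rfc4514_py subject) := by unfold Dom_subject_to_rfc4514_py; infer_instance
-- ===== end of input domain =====

-- ===== PORT A =====
-- One honest line: B escapes with seven whole-string replace passes plus two boundary patches
-- (instead of A's per-index classification loop) and formats the RDNs by recursive descent that
-- appends the head after the formatted tail (instead of A's reversed()-loop) — objective: alternative.

-- shared module constant RFC4514_ATTRIBUTE_NAMES (a dict both the original and B read)
def pvRFC4514Names : PySem.Dict String String := PySem.Dict.ofList
  [("commonName", "CN"), ("countryName", "C"), ("localityName", "L"),
   ("stateOrProvinceName", "ST"), ("organizationName", "O"),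
   ("organizationalUnitName", "OU"), ("emailAddress", "emailAddress"),
   ("serialNumber", "serialNumber"), ("streetAddress", "street"),
   ("postalCode", "postalCode"), ("domainComponent", "DC")]

-- the set {",", "+", '"', "\\", "<", ">", ";"} of always-special characters (A's literal)
def pvSpecials : List Char := [',', '+', '"', '\\', '<', '>', ';']

-- port of A's _escape_rfc4514_value: loop over enumerate(value) appending one piece per char;
-- strings are handled on the List Char side (PySem.Chars), ''.join = Chars.join []
def escape_rfc4514_value_py (value : String) : List Char :=
  let cs := value.toList
  PySem.Chars.join []
    ((PySem.List.enumerate cs).foldl (fun acc p =>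
      acc ++ [if p.2 ∈ pvSpecials ∨ (p.1 = 0 ∧ (p.2 = '#' ∨ p.2 = ' ')) ∨
                 (p.1 = (cs.length : Int) - 1 ∧ p.2 = ' ')
              then ['\\', p.2] else [p.2]]) [])

def subject_to_rfc4514_py (subject : List (List (String × String))) : Option String :=
  let rdns := subject.reverse.foldl (fun rdns rdn =>
    rdns ++ [PySem.Chars.join ['+']
      (rdn.foldl (fun attrs kv =>
        attrs ++ [(pvRFC4514Names.getD kv.1 kv.1).toList ++ '=' :: escape_rfc4514_value_py kv.2]) [])])
    ([] : List (List Char))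
  if rdns = [] then none else some (String.ofList (PySem.Chars.join [','] rdns))

-- ===== PORT B =====
-- B's escape: value.replace("\\","\\\\"), then one replace pass per remaining special char,
-- then the two boundary patches ("out[:-1]" ported as dropLast, "value[:1]" as take 1)
def pvEscapeAlt (value : String) : List Char :=
  let v := value.toList
  let core := [',', '+', '"', '<', '>', ';'].foldl
    (fun out ch => PySem.Chars.replace out [ch] ['\\', ch])
    (PySem.Chars.replace v ['\\'] ['\\', '\\'])
  let core2 := if PySem.Chars.endswith v [' '] = true ∧ 1 < v.length
               then core.dropLast ++ ['\\', ' '] else core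
  if v.take 1 = ['#'] ∨ v.take 1 = [' '] then '\\' :: core2 else core2

-- B's recursive fmt: the head RDN is appended after the formatted tail (rest + "," + attrs)
def pvFmt : List (List (String × String)) → Option (List Char)
  | [] => none
  | head :: tail =>
    let attrs := PySem.Chars.join ['+']
      (head.map (fun kv => (pvRFC4514Names.getD kv.1 kv.1).toList ++ '=' :: pvEscapeAlt kv.2))
    match pvFmt tail with
    | none => some attrs
    | some rest => some (rest ++ ',' :: attrs)

def subject_to_rfc4514_py_alt (subject : List (List (String × String))) : Option String :=
  (pvFmt subject).map String.ofList

-- ===== PRECONDITION & SPEC =====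
def Spec_subject_to_rfc4514_py (subject : List (List (String × String))) (out : Option String) : Prop := out = subject_to_rfc4514_py_alt subject
instance (subject : List (List (String × String))) (out : Option String) : Decidable (Spec_subject_to_rfc4514_py subject out) := by unfold Spec_subject_to_rfc4514_py; infer_instance

-- ===== CLAIM (what is proved, stated in full; the proofs are below) =====
def Claim_equal_subject_to_rfc4514_py : Prop := ∀ (subject : List (List (String × String))), Dom_subject_to_rfc4514_py subject → Spec_subject_to_rfc4514_py subject (subject_to_rfc4514_py subject)

-- ===== LEMMAS AND PROOFS =====

lemma join_nil_eq_flatten (parts : List (List Char)) : PySem.Chars.join [] parts = parts.flatten := by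
  simp only [PySem.Chars.join]
  induction parts with
  | nil => rfl
  | cons p ps ih =>
    cases ps with
    | nil => simp [List.intercalate]
    | cons q qs => simp only [List.intercalate, List.intersperse] at *; simp_all

lemma endswith_concat_space (v : List Char) (c : Char) :
    (PySem.Chars.endswith (v ++ [c]) [' '] = true) ↔ c = ' ' := by
  rw [PySem.Chars.endswith_iff]
  constructor
  · rintro ⟨t, ht⟩
    have := congrArg List.getLast? ht
    simpa using this.symm
  · rintro rfl; exact ⟨v, rfl⟩

-- A's per-character escape decision, parameterised by len(value)
def itemA (n : Int) (p : Int × Char) : List Char :=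
  if p.2 ∈ pvSpecials ∨ (p.1 = 0 ∧ (p.2 = '#' ∨ p.2 = ' ')) ∨ (p.1 = n - 1 ∧ p.2 = ' ')
  then ['\\', p.2] else [p.2]

-- the always-special escape of one char, the common denominator of both sides
def pvCore (c : Char) : List Char := if c ∈ pvSpecials then ['\\', c] else [c]

-- the staged escape with pvCore in place of the replace chain
def pvAltChars (cs : List Char) : List Char :=
  let core := (cs.map pvCore).flatten
  let core2 := if PySem.Chars.endswith cs [' '] = true ∧ 1 < cs.length
               then core.dropLast ++ ['\\', ' '] else core
  if cs.take 1 = ['#'] ∨ cs.take 1 = [' '] then '\\' :: core2 else core2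

-- single-char replacement as a per-char map
def pvRep (c : Char) (ns : List Char) (x : Char) : List Char := if x = c then ns else [x]

lemma replace_go_singleton (c : Char) (ns : List Char) :
    ∀ (l acc : List Char) (fuel : Nat), l.length ≤ fuel →
      PySem.Chars.replace.go [c] ns fuel l acc
        = acc.reverse ++ l.flatMap (pvRep c ns) := by
  intro l
  induction l with
  | nil => intro acc fuel _; cases fuel <;> simp [PySem.Chars.replace.go]
  | cons x t ih =>
    intro acc fuel hf
    cases fuel with
    | zero => simp at hf
    | succ fuel =>
      by_cases hx : x = c
      · subst hx
        have hpre : ([x].isPrefixOf (x :: t)) = true := by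
          simp [List.isPrefixOf]
        simp only [PySem.Chars.replace.go, hpre, if_pos]
        rw [show List.drop [x].length (x :: t) = t from rfl]
        rw [ih (ns.reverse ++ acc) fuel (by simpa using Nat.le_of_succ_le_succ hf)]
        simp [pvRep]
      · have hpre : ([c].isPrefixOf (x :: t)) = false := by
          simp [List.isPrefixOf]
          exact fun h => hx h.symm
        simp only [PySem.Chars.replace.go, hpre]
        rw [if_neg (by simp)]
        rw [ih (x :: acc) fuel (by simpa using Nat.le_of_succ_le_succ hf)]
        simp [pvRep, hx]

lemma replace_singleton (cs : List Char) (c : Char) (ns : List Char) :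
    PySem.Chars.replace cs [c] ns = cs.flatMap (pvRep c ns) := by
  simp only [PySem.Chars.replace, List.isEmpty_cons, Bool.false_eq_true, if_false]
  simpa using replace_go_singleton c ns cs [] cs.length le_rfl

-- the partial escape after handling '\' and the specials of list S
def pvEscS (S : List Char) (c : Char) : List Char :=
  if c = '\\' ∨ c ∈ S then ['\\', c] else [c]

lemma escS_step (S : List Char) (d : Char) (hd : d ≠ '\\') (hdS : d ∉ S) (c : Char) :
    (pvEscS S c).flatMap (pvRep d ['\\', d]) = pvEscS (S ++ [d]) c := by
  unfold pvEscS pvRep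
  by_cases h : c = '\\' ∨ c ∈ S
  · rw [if_pos h, if_pos (by rcases h with h | h; exact Or.inl h; exact Or.inr (by simp [h]))]
    have hc : c ≠ d := by rintro rfl; rcases h with h | h; exact hd h; exact hdS h
    simp [hd.symm, hc]
  · rw [if_neg h]
    by_cases hc : c = d
    · subst hc; simp [List.flatMap]
    · rw [if_neg (by
        rintro (h1 | h2); exact h (Or.inl h1)
        rcases List.mem_append.mp h2 with h2 | h2
        · exact h (Or.inr h2)
        · exact hc (by simpa using h2))]
      simp [List.flatMap, hc]

lemma chain_eq (v : List Char) :
    [',', '+', '"', '<', '>', ';'].foldl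
      (fun out ch => PySem.Chars.replace out [ch] ['\\', ch])
      (PySem.Chars.replace v ['\\'] ['\\', '\\'])
    = (v.map pvCore).flatten := by
  have base : PySem.Chars.replace v ['\\'] ['\\', '\\'] = v.flatMap (pvEscS []) := by
    rw [replace_singleton]
    apply List.flatMap_congr; intro c _
    unfold pvRep pvEscS; by_cases h : c = '\\' <;> simp [h]
  have step : ∀ (S : List Char) (rest : List Char),
      (∀ d ∈ rest, d ≠ '\\') → (∀ d ∈ rest, d ∉ S) → rest.Nodup →
      rest.foldl (fun out ch => PySem.Chars.replace out [ch] ['\\', ch]) (v.flatMap (pvEscS S))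
        = v.flatMap (pvEscS (S ++ rest)) := by
    intro S rest
    induction rest generalizing S with
    | nil => intro _ _ _; simp
    | cons d rest ih =>
      intro h1 h2 h3
      simp only [List.foldl_cons]
      rw [replace_singleton, List.flatMap_assoc]
      have : (v.flatMap fun a => (pvEscS S a).flatMap (pvRep d ['\\', d]))
          = v.flatMap (pvEscS (S ++ [d])) := by
        apply List.flatMap_congr; intro c _
        exact escS_step S d (h1 d (by simp)) (h2 d (by simp)) c
      rw [this, ih (S ++ [d])
        (fun x hx => h1 x (by simp [hx]))
        (fun x hx => by
          intro hmem
          rcases List.mem_append.mp hmem with hm | hm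
          · exact h2 x (by simp [hx]) hm
          · have : x = d := by simpa using hm
            subst this
            exact (List.nodup_cons.mp h3).1 hx)
        (List.nodup_cons.mp h3).2]
      simp
  rw [base, step [] [',', '+', '"', '<', '>', ';']
    (by intro d hd; fin_cases hd <;> decide)
    (by simp)
    (by norm_num; decide)]
  have hiff : ∀ c : Char, (c = '\\' ∨ c ∈ ([',', '+', '"', '<', '>', ';'] : List Char)) ↔ c ∈ pvSpecials := by
    intro c; simp [pvSpecials]; tauto
  have : pvEscS ([] ++ [',', '+', '"', '<', '>', ';']) = pvCore := by
    funext c; unfold pvEscS pvCore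
    by_cases h : c ∈ pvSpecials
    · rw [if_pos (by simpa using (hiff c).mpr h), if_pos h]
    · rw [if_neg (fun hc => h ((hiff c).mp (by simpa using hc))), if_neg h]
  rw [this, List.flatMap_def]

lemma escapeAlt_eq (value : String) : pvEscapeAlt value = pvAltChars value.toList := by
  simp only [pvEscapeAlt, pvAltChars, chain_eq]

lemma escape_chars_concat (a b : Char) (mid : List Char) :
    ((PySem.List.enumerate (a :: (mid ++ [b]))).map (itemA ((a :: (mid ++ [b])).length : Int))).flatten
    = pvAltChars (a :: (mid ++ [b])) := by
  unfold pvAltChars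
  have hn : ((a :: (mid ++ [b])).length : Int) = (mid.length : Int) + 2 := by simp; omega
  have hmid : ((PySem.List.enumerate mid 1).map (itemA ((mid.length : Int) + 2)))
      = mid.map pvCore := by
    conv_rhs => rw [← PySem.List.map_snd_enumerate mid 1, List.map_map]
    apply List.map_congr_left
    intro p hp
    rw [PySem.List.mem_enumerate_iff] at hp
    obtain ⟨k, hk, rfl⟩ := hp
    have h0 : ¬((1 : Int) + k = 0) := by omega
    have h1 : ¬((1 : Int) + k = (mid.length : Int) + 2 - 1) := by omega
    simp [itemA, pvCore, h0, h1, Function.comp]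
  have hhead : itemA ((mid.length : Int) + 2) (0, a)
      = if a ∈ pvSpecials ∨ a = '#' ∨ a = ' ' then ['\\', a] else [a] := by
    have h1 : ¬((0 : Int) = (mid.length : Int) + 2 - 1) := by omega
    simp [itemA, h1]
  have hlast : itemA ((mid.length : Int) + 2) (1 + (mid.length : Int), b)
      = if b ∈ pvSpecials ∨ b = ' ' then ['\\', b] else [b] := by
    have h2 : ¬(((mid.length : Int) + 2 - 1) = 0) := by omega
    have h1 : (1 : Int) + mid.length = (mid.length : Int) + 2 - 1 := by omega
    by_cases hb : b = ' ' <;> simp [itemA, h1, h2, hb]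
  have hend : (PySem.Chars.endswith (a :: (mid ++ [b])) [' '] = true) ↔ b = ' ' := by
    rw [show a :: (mid ++ [b]) = (a :: mid) ++ [b] by simp]
    exact endswith_concat_space _ _
  rw [hn]
  simp only [PySem.List.enumerate_cons, PySem.List.enumerate_append, PySem.List.enumerate_cons,
    PySem.List.enumerate_nil, List.map_cons, List.map_append, List.flatten_cons,
    List.flatten_append, List.map_nil, List.flatten_nil, List.append_nil]
  norm_num
  rw [hmid, hhead, hlast]
  have hlen : 1 < (a :: (mid ++ [b])).length := by simp
  simp only [hend]
  by_cases hb : b = ' '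
  · subst hb
    rw [if_pos rfl]
    rw [show (if (' ' ∈ pvSpecials ∨ (' ' : Char) = ' ') then (['\\', ' '] : List Char) else [' '])
          = ['\\', ' '] from if_pos (Or.inr rfl)]
    rw [show pvCore ' ' = [' '] from by decide] at *
    rw [show pvCore a ++ ((mid.map pvCore).flatten ++ [' '])
          = (pvCore a ++ (mid.map pvCore).flatten) ++ [' '] from (List.append_assoc ..).symm,
      List.dropLast_concat]
    by_cases h2 : a = '#' ∨ a = ' '
    · rcases h2 with rfl | rfl <;> simp [pvCore, pvSpecials]
    · obtain ⟨n1, n2⟩ := not_or.mp h2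
      simp [pvCore, n1, n2]
  · rw [if_neg hb]
    rw [show (if b ∈ pvSpecials ∨ b = ' ' then (['\\', b] : List Char) else [b]) = pvCore b from by
      by_cases hs : b ∈ pvSpecials <;> simp [pvCore, hs, hb]]
    by_cases h2 : a = '#' ∨ a = ' '
    · rcases h2 with rfl | rfl <;> simp [pvCore, pvSpecials]
    · obtain ⟨n1, n2⟩ := not_or.mp h2
      simp [pvCore, n1, n2]

lemma escape_chars_eq (cs : List Char) :
    ((PySem.List.enumerate cs).map (itemA (cs.length : Int))).flatten = pvAltChars cs := by
  match cs with
  | [] => rfl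
  | a :: t =>
    rcases List.eq_nil_or_concat t with rfl | ⟨mid, b, rfl⟩
    · unfold pvAltChars
      simp only [PySem.List.enumerate_cons, PySem.List.enumerate_nil, List.map, List.flatten,
        itemA, pvCore, List.length_cons, List.length_nil, List.take, List.cons.injEq, and_true]
      norm_num
      by_cases h2 : a = '#' ∨ a = ' '
      · rcases h2 with rfl | rfl <;> simp [pvSpecials]
      · obtain ⟨n1, n2⟩ := not_or.mp h2
        by_cases hs : a ∈ pvSpecials <;> simp_all
    · simpa [List.concat_eq_append] using escape_chars_concat a b mid

lemma escape_eq (value : String) : escape_rfc4514_value_py value = pvEscapeAlt value := by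
  unfold escape_rfc4514_value_py
  rw [escapeAlt_eq]
  simp only [join_nil_eq_flatten, PySem.List.foldl_append_singleton_eq_map, List.nil_append]
  exact escape_chars_eq value.toList

-- the per-RDN formatter shared by the two characterisations below
def pvG (rdn : List (String × String)) : List Char :=
  PySem.Chars.join ['+']
    (rdn.map (fun kv => (pvRFC4514Names.getD kv.1 kv.1).toList ++ '=' :: pvEscapeAlt kv.2))

lemma join_comma_concat (xs : List (List Char)) (y : List Char) (h : xs ≠ []) :
    PySem.Chars.join [','] (xs ++ [y]) = PySem.Chars.join [','] xs ++ ',' :: y := by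
  simp only [PySem.Chars.join]
  induction xs with
  | nil => exact absurd rfl h
  | cons x t ih =>
    cases t with
    | nil => simp [List.intercalate]
    | cons z zs =>
      have := ih (by simp)
      simp only [List.cons_append, List.intercalate, List.intersperse] at *
      simp_all

lemma pvFmt_eq (subject : List (List (String × String))) :
    pvFmt subject
      = if subject = [] then none
        else some (PySem.Chars.join [','] ((subject.map pvG).reverse)) := by
  induction subject with
  | nil => rfl
  | cons head tail ih =>
    by_cases h : tail = []
    · subst h; simp [pvFmt, pvG]
    · simp only [pvFmt, ih, if_neg h]
      rw [if_neg (List.cons_ne_nil _ _)]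
      simp only [List.map_cons, List.reverse_cons]
      rw [join_comma_concat _ _ (by simp [h])]
      simp [pvG]

-- ===== VERDICT (by name: the statement is the Claim_ definition above) =====
theorem subject_to_rfc4514_py_spec : Claim_equal_subject_to_rfc4514_py := by
  intro subject _
  unfold Spec_subject_to_rfc4514_py subject_to_rfc4514_py subject_to_rfc4514_py_alt
  rw [pvFmt_eq]
  simp only [PySem.List.foldl_append_singleton_eq_map, List.nil_append]
  by_cases h : subject = []
  · simp [h]
  · rw [if_neg (by simp [h]), if_neg h]
    simp only [Option.map_some]
    congr 2
    rw [← List.map_reverse]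
    congr 1
    apply List.map_congr_left
    intro rdn _
    simp [pvG, escape_eq]
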